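-- pv_equiv track=rewrite | github.com/harshil1903/leetcode | String/Ex_1880/1880_check_word_equals_sum_of_two_words.py | isSumEqual2
-- ===== SOURCE A (Python) =====
-- def isSumEqual2(firstWord: str, secondWord: str, targetWord: str) -> bool:
--     # ord('a') = 97
--
--     first, second, target = 0, 0, 0
--     length = len(firstWord)
--
--     for i in firstWord:
--         length -= 1
--         first = first + ((ord(i) - 97) * 10 ** length)
--
--     length = len(secondWord)
--
--     for i in secondWord:
--         length -= 1
--         second = second + ((ord(i) - 97) * 10 ** length)
--
--     length = len(targetWord)
--
--     for i in targetWord: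
--         length -= 1
--         target = target + ((ord(i) - 97) * 10 ** length)
--
--     return first + second == target
-- ===== SOURCE B (Python) =====
-- def isSumEqual2(firstWord: str, secondWord: str, targetWord: str) -> bool:
--     # Schoolbook addition check: walk the three words from the least significant
--     # digit with a carry; never builds the three big integers at all.
--     f = [ord(c) - 97 for c in reversed(firstWord)]
--     s = [ord(c) - 97 for c in reversed(secondWord)]
--     t = [ord(c) - 97 for c in reversed(targetWord)]
--     carry = 0
--     for i in range(max(len(f), len(s), len(t))):
--         d = carry
--         if i < len(f):
--             d += f[i]
--         if i < len(s):
--             d += s[i]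
--         if i < len(t):
--             d -= t[i]
--         if d % 10:
--             return False
--         carry = d // 10
--     return carry == 0
-- ===== Notes on version B (the rewrite author's own statement) =====
-- stated objective: alternative
-- what changed: Instead of converting all three words to big integers with 10**position terms and comparing, B verifies the addition digit-by-digit from the least significant end with a running carry (schoolbook addition check), so no big integer is ever built.
import Mathlib
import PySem

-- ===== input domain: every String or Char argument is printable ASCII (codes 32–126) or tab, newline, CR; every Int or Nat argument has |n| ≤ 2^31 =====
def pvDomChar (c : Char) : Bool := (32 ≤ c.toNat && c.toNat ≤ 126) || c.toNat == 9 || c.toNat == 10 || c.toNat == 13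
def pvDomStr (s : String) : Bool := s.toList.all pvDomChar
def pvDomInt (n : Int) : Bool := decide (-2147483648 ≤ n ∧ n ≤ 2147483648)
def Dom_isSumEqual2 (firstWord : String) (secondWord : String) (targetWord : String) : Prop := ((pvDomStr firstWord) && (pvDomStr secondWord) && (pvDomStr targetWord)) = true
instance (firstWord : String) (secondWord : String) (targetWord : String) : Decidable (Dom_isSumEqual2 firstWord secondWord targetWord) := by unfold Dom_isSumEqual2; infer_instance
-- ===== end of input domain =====

-- B replaces A's three big-integer conversions and one big comparison by a digit-wise
-- schoolbook-addition check with a carry, walking the words from the least significant digit.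

-- ===== PORT A =====
-- A's loop: decrement length, then add (ord(c) - 97) * 10 ** length.
def pvPlaceLoop (s : String) : Int × Nat :=
  s.toList.foldl (fun (p : Int × Nat) (c : Char) =>
    (p.1 + ((c.toNat : Int) - 97) * (10 : Int) ^ (p.2 - 1), p.2 - 1)) (0, s.toList.length)

def isSumEqual2 (firstWord : String) (secondWord : String) (targetWord : String) : Bool :=
  let first := (pvPlaceLoop firstWord).1
  let second := (pvPlaceLoop secondWord).1
  let target := (pvPlaceLoop targetWord).1
  decide (first + second = target)

-- ===== PORT B =====
-- digit values, least significant first (Source B's reversed-comprehension lists)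
def pvDigitsRev (w : String) : List Int :=
  w.toList.reverse.map (fun c => (c.toNat : Int) - 97)

-- Source B's carry loop: each step consumes one position of each word (0 when exhausted);
-- d % 10 and d // 10 are Python's floor mod/div, ported with PySem.Int.mod/floordiv.
def pvCarryCheck (f s t : List Int) (carry : Int) : Bool :=
  if f.isEmpty && s.isEmpty && t.isEmpty then carry == 0
  else if PySem.Int.mod (carry + f.headD 0 + s.headD 0 - t.headD 0) 10 ≠ 0 then false
  else pvCarryCheck f.tail s.tail t.tail
        (PySem.Int.floordiv (carry + f.headD 0 + s.headD 0 - t.headD 0) 10)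
termination_by f.length + s.length + t.length
decreasing_by
  cases f <;> cases s <;> cases t <;> simp_all <;> omega

def isSumEqual2_alt (firstWord : String) (secondWord : String) (targetWord : String) : Bool :=
  pvCarryCheck (pvDigitsRev firstWord) (pvDigitsRev secondWord) (pvDigitsRev targetWord) 0

-- ===== PRECONDITION & SPEC =====
def Spec_isSumEqual2 (firstWord : String) (secondWord : String) (targetWord : String) (out : Bool) : Prop := out = isSumEqual2_alt firstWord secondWord targetWord
instance (firstWord : String) (secondWord : String) (targetWord : String) (out : Bool) : Decidable (Spec_isSumEqual2 firstWord secondWord targetWord out) := by unfold Spec_isSumEqual2; infer_instance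

-- ===== CLAIM (what is proved, stated in full; the proofs are below) =====
def Claim_equal_isSumEqual2 : Prop := ∀ (firstWord : String) (secondWord : String) (targetWord : String), Dom_isSumEqual2 firstWord secondWord targetWord → Spec_isSumEqual2 firstWord secondWord targetWord (isSumEqual2 firstWord secondWord targetWord)

-- ===== LEMMAS AND PROOFS =====

-- value of a little-endian digit list
def pvVal : List Int → Int
  | [] => 0
  | d :: ds => d + 10 * pvVal ds

theorem pvVal_head_tail (l : List Int) : pvVal l = l.headD 0 + 10 * pvVal l.tail := by
  cases l <;> simp [pvVal]

-- the carry loop decides value equality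
theorem pvCarryCheck_val (f s t : List Int) (carry : Int) :
    pvCarryCheck f s t carry = decide (pvVal f + pvVal s + carry = pvVal t) := by
  induction f, s, t, carry using pvCarryCheck.induct with
  | case1 f s t carry h =>
    rw [pvCarryCheck]
    simp only [h, if_true]
    obtain ⟨⟨hf, hs⟩, ht⟩ : (f = [] ∧ s = []) ∧ t = [] := by
      simpa [List.isEmpty_iff] using h
    subst hf; subst hs; subst ht
    simp [pvVal]
    by_cases hc : carry = 0 <;> simp [hc]
  | case2 f s t carry h hm =>
    rw [pvCarryCheck]
    simp only [h, Bool.false_eq_true, if_false, if_pos hm]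
    have hd : ¬ (10 : Int) ∣ (carry + f.headD 0 + s.headD 0 - t.headD 0) := by
      rw [← PySem.Int.mod_eq_zero_iff_dvd _ _]
      exact hm
    rw [pvVal_head_tail f, pvVal_head_tail s, pvVal_head_tail t]
    symm
    simp only [decide_eq_false_iff_not]
    intro heq
    exact hd ⟨pvVal t.tail - pvVal f.tail - pvVal s.tail, by omega⟩
  | case3 f s t carry h hm ih =>
    rw [pvCarryCheck]
    simp only [h, Bool.false_eq_true, if_false, if_neg hm, ih]
    have hdvd : (10 : Int) ∣ (carry + f.headD 0 + s.headD 0 - t.headD 0) :=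
      (PySem.Int.mod_eq_zero_iff_dvd _ _).mp (by simpa using hm)
    have hq : 10 * PySem.Int.floordiv (carry + f.headD 0 + s.headD 0 - t.headD 0) 10
        = carry + f.headD 0 + s.headD 0 - t.headD 0 := by
      rw [PySem.Int.floordiv_eq_ediv_of_pos (by norm_num)]
      exact Int.mul_ediv_cancel' hdvd
    rw [pvVal_head_tail f, pvVal_head_tail s, pvVal_head_tail t]
    congr 1
    simp only [eq_iff_iff]
    constructor <;> intro heq <;> omega

-- Horner value of a big-endian char list
def pvHornerL (l : List Char) : Int :=
  l.foldl (fun (num : Int) (c : Char) => num * 10 + ((c.toNat : Int) - 97)) 0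

theorem horner_acc (l : List Char) (acc : Int) :
    l.foldl (fun (num : Int) (c : Char) => num * 10 + ((c.toNat : Int) - 97)) acc
      = acc * (10 : Int) ^ l.length + pvHornerL l := by
  induction l generalizing acc with
  | nil => simp [pvHornerL]
  | cons c l ih =>
    simp only [pvHornerL, List.foldl_cons, List.length_cons]
    rw [ih (acc * 10 + _), ih (0 * 10 + _)]
    ring

-- A's place-value loop equals Horner
theorem place_eq_horner (l : List Char) (acc : Int) :
    (l.foldl (fun (p : Int × Nat) (c : Char) =>
        (p.1 + ((c.toNat : Int) - 97) * (10 : Int) ^ (p.2 - 1), p.2 - 1)) (acc, l.length)).1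
      = acc + pvHornerL l := by
  induction l generalizing acc with
  | nil => simp [pvHornerL]
  | cons c l ih =>
    simp only [pvHornerL, List.foldl_cons, List.length_cons, Nat.add_sub_cancel]
    rw [ih, horner_acc l (0 * 10 + _)]
    simp [pvHornerL]
    ring

theorem pvPlaceLoop_fst (s : String) : (pvPlaceLoop s).1 = pvHornerL s.toList := by
  unfold pvPlaceLoop
  simpa using place_eq_horner s.toList 0

-- little-endian value of the reversed digits equals the Horner value
theorem pvVal_digitsRev (w : String) : pvVal (pvDigitsRev w) = pvHornerL w.toList := by
  unfold pvDigitsRev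
  generalize w.toList = l
  induction l using List.reverseRecOn with
  | nil => simp [pvVal, pvHornerL]
  | append_singleton l c ih =>
    simp only [List.reverse_append, List.reverse_singleton, List.singleton_append,
      List.map_cons, pvVal, ih]
    unfold pvHornerL
    rw [List.foldl_append]
    simp [horner_acc]
    ring

theorem alt_eq_decide (f s t : String) :
    isSumEqual2_alt f s t
      = decide (pvHornerL f.toList + pvHornerL s.toList = pvHornerL t.toList) := by
  unfold isSumEqual2_alt
  rw [pvCarryCheck_val]
  simp [pvVal_digitsRev]

-- ===== VERDICT =====
theorem isSumEqual2_spec : Claim_equal_isSumEqual2 := by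
  intro f s t _
  unfold Spec_isSumEqual2 isSumEqual2
  rw [alt_eq_decide]
  simp [pvPlaceLoop_fst]
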